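-- pv_equiv track=rewrite | github.com/Yetiowner/TimeInspection | src/deep_timeit.py | getChunksToTime
-- ===== SOURCE A (Python) =====
-- CHUNK_ADJACENCIES = {"if ": ["elif ", "else:"], "try:": ["except ", "except:", "finally:"]}
--
-- def getChunksToTime(lines):
--     indices = []
--     for index, line in enumerate(lines):
--         if line.lstrip().startswith("return "):
--             continue
--         lineindentation = getIndentation(line)
--         nextlineindentation = getIndentation(lines[min(index+1, len(lines)-1)])
--         if nextlineindentation <= lineindentation:
--             indices.append([index, index])
--         else:
--             adjacentchunktitles = []
--             for i in CHUNK_ADJACENCIES: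
--                 for j in CHUNK_ADJACENCIES[i]:
--                     adjacentchunktitles.append(j)
--             shouldcont = False
--             for i in adjacentchunktitles:
--                 if lines[index].lstrip().startswith(i):
--                     shouldcont = True
--             if shouldcont:
--                 continue
--             nextIndexWhereLEQ = len(lines)-1
--             for newindex in range(index+1, len(lines)):
--                 if getIndentation(lines[newindex]) <= lineindentation:
--                     partofadjacent = False
--                     for key in CHUNK_ADJACENCIES:
--                         if lines[index].lstrip().startswith(key):
--                             partofadjacent = CHUNK_ADJACENCIES[key]
--                     if partofadjacent != False:
--                         oneofadjacent = False
--                         for potadj in partofadjacent: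
--                             if lines[newindex][len(getIndentation(lines[index])):].startswith(potadj):
--                                 oneofadjacent = True
--                         if not(oneofadjacent):
--                             nextIndexWhereLEQ = newindex-1
--                             break
--                     else:
--                         nextIndexWhereLEQ = newindex-1
--                         break
--             indices.append([index, nextIndexWhereLEQ])
--
--     return indices
--
-- def getIndentation(line):
--     try:
--         return " "*line.index(line.lstrip()[0])
--     except:
--         return ""
-- ===== SOURCE B (Python) =====
-- CHUNK_ADJACENCIES = {"if ": ["elif ", "else:"], "try:": ["except ", "except:", "finally:"]}
--
-- def getChunksToTime(lines):
--     n = len(lines)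
--     stripped = [ln.lstrip() for ln in lines]
--     indent = [0 if s == "" else len(ln) - len(s) for ln, s in zip(lines, stripped)]
--     # nse[i] = first index j > i with indent[j] <= indent[i], else n (monotonic stack, one right-to-left pass)
--     nse = [n] * n
--     stack = []
--     for i in range(n - 1, -1, -1):
--         while stack and indent[stack[-1]] > indent[i]:
--             stack.pop()
--         nse[i] = stack[-1] if stack else n
--         stack.append(i)
--     titles = [t for ts in CHUNK_ADJACENCIES.values() for t in ts]
--     out = []
--     for i in range(n):
--         s = stripped[i]
--         if s.startswith("return "):
--             continue
--         ni = min(i + 1, n - 1)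
--         if indent[ni] <= indent[i]:
--             out.append([i, i])
--             continue
--         if any(s.startswith(t) for t in titles):
--             continue
--         adj = None
--         for key, vals in CHUNK_ADJACENCIES.items():
--             if s.startswith(key):
--                 adj = vals
--         j = nse[i]
--         if adj is not None:
--             # skip adjacent-chunk continuation lines, jumping over deeper-indented blocks via nse
--             while j < n and any(lines[j][indent[i]:].startswith(t) for t in adj):
--                 j += 1
--                 while j < n and indent[j] > indent[i]:
--                     j = nse[j]
--         out.append([i, n - 1 if j >= n else j - 1])
--     return out
-- ===== Notes on version B (the rewrite author's own statement) =====
-- stated objective: alternative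
-- what changed: B precomputes each line's stripped form and indentation once, finds every line's next-smaller-or-equal-indentation index in one right-to-left monotonic-stack pass, and resolves if/try continuation lines by jumping along that nse chain, instead of A's per-line forward rescan that re-strips and re-measures every line inside nested loops.
import Mathlib
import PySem

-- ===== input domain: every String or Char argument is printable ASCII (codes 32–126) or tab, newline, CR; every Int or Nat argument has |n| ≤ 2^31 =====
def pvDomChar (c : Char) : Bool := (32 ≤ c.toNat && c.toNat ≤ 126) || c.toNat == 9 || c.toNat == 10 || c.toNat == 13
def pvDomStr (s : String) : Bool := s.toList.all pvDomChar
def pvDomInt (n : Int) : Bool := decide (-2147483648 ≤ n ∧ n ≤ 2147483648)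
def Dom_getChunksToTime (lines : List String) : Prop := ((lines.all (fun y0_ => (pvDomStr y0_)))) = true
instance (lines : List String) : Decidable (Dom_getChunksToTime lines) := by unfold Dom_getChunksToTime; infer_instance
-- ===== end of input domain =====

-- B replaces A's per-line forward re-scans (each re-stripping every scanned line) by one precomputed
-- indent table, a right-to-left monotonic-stack next-smaller-or-equal pass and nse-chain jumps.

-- ===== PORT A =====
def chunkAdjacencies : List (String × List String) :=
  [("if ", ["elif ", "else:"]), ("try:", ["except ", "except:", "finally:"])]

def getIndentation (line : String) : String :=
  match PySem.Str.pyGet? (PySem.Str.lstrip line) 0 with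
  | none => ""       -- line.lstrip()[0] raised IndexError → except: return ""
  | some c =>
    -- line.index(c): Python raises ValueError when absent (caught → ""); find's -1 marks that
    let i := PySem.Str.find line (String.ofList [c])
    if i = -1 then "" else String.ofList (PySem.List.pyRepeat [' '] i)   -- " " * i

def innerLoopA (lines : List String) (index : Int) (lineindentation : String) :
    List Int → Int → Int
  | [], acc => acc
  | newindex :: rest, acc =>
    if getIndentation ((PySem.List.pyGet? lines newindex).getD "") ≤ lineindentation then
      let partofadjacent := chunkAdjacencies.foldl
        (fun pa kv => if PySem.Str.startswith (PySem.Str.lstrip ((PySem.List.pyGet? lines index).getD "")) kv.1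
                      then some kv.2 else pa) none
      match partofadjacent with
      | some adjl =>
        if adjl.foldl (fun oa potadj =>
            if PySem.Str.startswith (PySem.Str.slice ((PySem.List.pyGet? lines newindex).getD "")
                (some (PySem.Str.len (getIndentation ((PySem.List.pyGet? lines index).getD "")))) none) potadj
            then true else oa) false
        then innerLoopA lines index lineindentation rest acc
        else newindex - 1
      | none => newindex - 1
    else innerLoopA lines index lineindentation rest acc

def getChunksToTime (lines : List String) : List (List Int) :=
  (PySem.List.enumerate lines).foldl (fun indices il =>
    let index := il.1
    let line := il.2
    if PySem.Str.startswith (PySem.Str.lstrip line) "return " then indices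
    else
      let lineindentation := getIndentation line
      let nextlineindentation :=
        getIndentation ((PySem.List.pyGet? lines (min (index+1) ((lines.length:Int)-1))).getD "")
      if nextlineindentation ≤ lineindentation then indices ++ [[index, index]]
      else
        let adjacentchunktitles := chunkAdjacencies.foldl
          (fun acc kv => kv.2.foldl (fun acc2 j => acc2 ++ [j]) acc) []
        if adjacentchunktitles.foldl (fun sc t =>
            if PySem.Str.startswith (PySem.Str.lstrip ((PySem.List.pyGet? lines index).getD "")) t
            then true else sc) false
        then indices
        else indices ++ [[index,
          innerLoopA lines index lineindentation
            (PySem.List.pyRange (index+1) (lines.length:Int)) ((lines.length:Int)-1)]]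
    ) []

-- ===== PORT B =====
def bLineIndent (p : String × String) : Int :=
  if p.2 = "" then 0 else PySem.Str.len p.1 - PySem.Str.len p.2

def popWhileGT (ind : List Int) (x : Int) : List Nat → List Nat
  | [] => []
  | t :: rest => if x < ind.getD t 0 then popWhileGT ind x rest else t :: rest

def nseLoop (ind : List Int) (n : Nat) : Nat → List Nat → List Nat → List Nat
  | 0, _, acc => acc
  | i+1, stack, acc =>
    let st := popWhileGT ind (ind.getD i 0) stack
    nseLoop ind n i (i :: st) (st.headD n :: acc)

-- inner 'while j < n and indent[j] > x: j = nse[j]' (fuel bounds the n steps it can take)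
def chaseNse (ind : List Int) (nse : List Nat) (n : Nat) (x : Int) : Nat → Nat → Nat
  | 0, j => j
  | fuel+1, j => if j < n ∧ x < ind.getD j 0 then chaseNse ind nse n x fuel (nse.getD j n) else j

-- outer 'while j < n and any(...)' continuation-skipping loop of B
def skipCont (lines : List String) (ind : List Int) (nse : List Nat) (n : Nat)
    (adjl : List String) (x : Int) : Nat → Nat → Nat
  | 0, j => j
  | fuel+1, j =>
    if j < n ∧ adjl.any (fun t => PySem.Str.startswith (PySem.Str.slice (lines.getD j "") (some x) none) t) then
      skipCont lines ind nse n adjl x fuel (chaseNse ind nse n x n (j+1))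
    else j

def getChunksToTime_alt (lines : List String) : List (List Int) :=
  let n := lines.length
  let stripped := lines.map PySem.Str.lstrip
  let ind := (lines.zip stripped).map bLineIndent
  let nse := nseLoop ind n n [] []
  let titles := chunkAdjacencies.flatMap (fun kv => kv.2)
  (List.range n).foldl (fun out i =>
    let s := stripped.getD i ""
    if PySem.Str.startswith s "return " then out
    else
      let xi := ind.getD i 0
      if ind.getD (min (i+1) (n-1)) 0 ≤ xi then out ++ [[(i:Int), (i:Int)]]
      else if titles.any (fun t => PySem.Str.startswith s t) then out
      else
        let adj := chunkAdjacencies.foldl (fun a kv => if PySem.Str.startswith s kv.1 then some kv.2 else a) none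
        let j0 := nse.getD i n
        let j := match adj with
          | none => j0
          | some adjl => skipCont lines ind nse n adjl xi n j0
        out ++ [[(i:Int), if n ≤ j then (n:Int) - 1 else (j:Int) - 1]]
    ) []

-- ===== PRECONDITION & SPEC =====
def Spec_getChunksToTime (lines : List String) (out : List (List Int)) : Prop := out = getChunksToTime_alt lines
instance (lines : List String) (out : List (List Int)) : Decidable (Spec_getChunksToTime lines out) := by unfold Spec_getChunksToTime; infer_instance

-- ===== CLAIM (what is proved, stated in full; the proofs are below) =====
def Claim_equal_getChunksToTime : Prop := ∀ (lines : List String), Dom_getChunksToTime lines → Spec_getChunksToTime lines (getChunksToTime lines)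

-- ===== LEMMAS AND PROOFS =====
set_option maxHeartbeats 1000000

-- leading-whitespace count as A's getIndentation computes it (0 for an all-whitespace line)
def indNat (line : String) : Nat :=
  if PySem.Chars.lstrip line.toList = [] then 0 else (line.toList.takeWhile PySem.Chars.isspace).length

def indList (lines : List String) : List Int :=
  (lines.zip (lines.map PySem.Str.lstrip)).map bLineIndent

-- first k with j ≤ k < n and ind[k] ≤ x, else n : the reference scan both programs implement
def scanLEQ (ind : List Int) (n : Nat) (x : Int) (j : Nat) : Nat :=
  if h : j < n then (if ind.getD j 0 ≤ x then j else scanLEQ ind n x (j+1)) else n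
  termination_by n - j
  decreasing_by omega

lemma scanLEQ_le (ind : List Int) (n : Nat) (x : Int) (j : Nat) : scanLEQ ind n x j ≤ n := by
  fun_induction scanLEQ <;> omega

lemma scanLEQ_ge (ind : List Int) (n : Nat) (x : Int) (j : Nat) (h : j ≤ n) :
    j ≤ scanLEQ ind n x j := by
  fun_induction scanLEQ <;> omega

lemma scanLEQ_pos {ind : List Int} {n : Nat} {x : Int} {j : Nat}
    (h : j < n) (hle : ind.getD j 0 ≤ x) : scanLEQ ind n x j = j := by
  rw [scanLEQ, dif_pos h, if_pos hle]

lemma scanLEQ_step {ind : List Int} {n : Nat} {x : Int} {j : Nat}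
    (h : j < n) (hgt : x < ind.getD j 0) : scanLEQ ind n x j = scanLEQ ind n x (j+1) := by
  rw [scanLEQ, dif_pos h, if_neg (not_le.mpr hgt)]

lemma scanLEQ_stop {ind : List Int} {n : Nat} {x : Int} {j : Nat}
    (h : ¬ j < n) : scanLEQ ind n x j = n := by
  rw [scanLEQ, dif_neg h]

def chainST (ind : List Int) (n : Nat) (j : Nat) : List Nat :=
  if h : j < n then j :: chainST ind n (scanLEQ ind n (ind.getD j 0) (j+1)) else []
  termination_by n - j
  decreasing_by
    have h1 := scanLEQ_ge ind n (ind.getD j 0) (j+1) (by omega)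
    have h2 := scanLEQ_le ind n (ind.getD j 0) (j+1)
    omega

def scanSkip (isC : Nat → Bool) (ind : List Int) (n : Nat) (x : Int) (j : Nat) : Nat :=
  if h : scanLEQ ind n x j < n then
    (if isC (scanLEQ ind n x j) then scanSkip isC ind n x (scanLEQ ind n x j + 1) else scanLEQ ind n x j)
  else n
  termination_by n + 1 - j
  decreasing_by
    have h1 : j ≤ n := by
      by_contra hc
      rw [scanLEQ_stop (by omega)] at h
      omega
    have h2 := scanLEQ_ge ind n x j h1
    omega

lemma scanSkip_le (isC : Nat → Bool) (ind : List Int) (n : Nat) (x : Int) (j : Nat) :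
    scanSkip isC ind n x j ≤ n := by
  fun_induction scanSkip <;> omega

lemma scanLEQ_val (ind : List Int) (n : Nat) (x : Int) (j : Nat) (h : scanLEQ ind n x j < n) :
    ind.getD (scanLEQ ind n x j) 0 ≤ x := by
  fun_induction scanLEQ with
  | case1 => simpa using ‹_›
  | case2 j h1 h2 ih => exact ih h
  | case3 => omega

lemma scanLEQ_min (ind : List Int) (n : Nat) (x : Int) (j : Nat) :
    ∀ k, j ≤ k → k < scanLEQ ind n x j → x < ind.getD k 0 := by
  fun_induction scanLEQ with
  | case1 j h hle => intro k h1 h2; omega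
  | case2 j h hle ih =>
    intro k h1 h2
    rcases Nat.eq_or_lt_of_le h1 with rfl | h1
    · simpa using hle
    · exact ih k h1 h2
  | case3 j h => intro k h1 h2; omega

lemma scanLEQ_congr_aux (ind : List Int) (n : Nat) (x : Int) :
    ∀ (d j m : Nat), m - j ≤ d → j ≤ m → m ≤ n → (∀ k, j ≤ k → k < m → x < ind.getD k 0) →
    scanLEQ ind n x j = scanLEQ ind n x m := by
  intro d
  induction d with
  | zero =>
    intro j m h1 h2 _ _
    have hjm : j = m := by omega
    subst hjm
    rfl
  | succ d ih =>
    intro j m h1 h2 h3 hall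
    rcases Nat.eq_or_lt_of_le h2 with rfl | hlt
    · rfl
    · have hj : j < n := by omega
      rw [scanLEQ_step hj (hall j le_rfl hlt)]
      exact ih (j+1) m (by omega) (by omega) h3 (fun k hk1 hk2 => hall k (by omega) hk2)

lemma scanLEQ_congr (ind : List Int) (n : Nat) (x : Int) (j m : Nat)
    (h2 : j ≤ m) (h3 : m ≤ n) (hall : ∀ k, j ≤ k → k < m → x < ind.getD k 0) :
    scanLEQ ind n x j = scanLEQ ind n x m :=
  scanLEQ_congr_aux ind n x (m - j) j m le_rfl h2 h3 hall

lemma scanLEQ_idem (ind : List Int) (n : Nat) (x : Int) (j : Nat) :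
    scanLEQ ind n x (scanLEQ ind n x j) = scanLEQ ind n x j := by
  by_cases h : scanLEQ ind n x j < n
  · exact scanLEQ_pos h (scanLEQ_val ind n x j h)
  · have := scanLEQ_le ind n x j
    have hn : scanLEQ ind n x j = n := by omega
    rw [hn, scanLEQ_stop (by omega)]

-- around one pop-step: everything strictly between j+1 and the next ≤-ind[j] index is even deeper
lemma scanLEQ_jump (ind : List Int) (n : Nat) (x : Int) (j : Nat) (hj : j < n)
    (hgt : x < ind.getD j 0) :
    scanLEQ ind n x j = scanLEQ ind n x (scanLEQ ind n (ind.getD j 0) (j+1)) := by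
  rw [scanLEQ_step hj hgt]
  refine scanLEQ_congr ind n x (j+1) _ (scanLEQ_ge _ _ _ _ (by omega)) (scanLEQ_le _ _ _ _) ?_
  intro k h1 h2
  exact lt_trans hgt (scanLEQ_min ind n (ind.getD j 0) (j+1) k h1 h2)

lemma popWhileGT_chain (ind : List Int) (n : Nat) (x : Int) :
    ∀ (d j : Nat), n - j ≤ d → j ≤ n →
      popWhileGT ind x (chainST ind n j) = chainST ind n (scanLEQ ind n x j) := by
  intro d
  induction d with
  | zero =>
    intro j h1 h2
    have e1 : chainST ind n j = [] := by
      rw [chainST]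
      rw [dif_neg (by omega)]
    have e2 : chainST ind n n = [] := by
      rw [chainST]
      rw [dif_neg (lt_irrefl n)]
    rw [e1, scanLEQ_stop (by omega), e2]
    rfl
  | succ d ih =>
    intro j h1 h2
    by_cases hj : j < n
    · have hchain : chainST ind n j = j :: chainST ind n (scanLEQ ind n (ind.getD j 0) (j+1)) := by
        conv_lhs => rw [chainST]
        rw [dif_pos hj]
      by_cases hx : x < ind.getD j 0
      · have hge := scanLEQ_ge ind n (ind.getD j 0) (j+1) (by omega)
        have hle := scanLEQ_le ind n (ind.getD j 0) (j+1)
        rw [hchain, popWhileGT, if_pos hx]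
        rw [ih _ (by omega) hle, scanLEQ_jump ind n x j hj hx]
      · rw [hchain, popWhileGT, if_neg hx, scanLEQ_pos hj (by omega), ← hchain]
    · have e1 : chainST ind n j = [] := by
        rw [chainST]
        rw [dif_neg hj]
      rw [e1, scanLEQ_stop hj]
      have e2 : chainST ind n n = [] := by
        rw [chainST]
        rw [dif_neg (lt_irrefl n)]
      rw [e2]
      rfl

lemma chainST_headD (ind : List Int) (n : Nat) (m : Nat) (h : m ≤ n) :
    (chainST ind n m).headD n = m := by
  rw [chainST]
  by_cases hm : m < n
  · rw [dif_pos hm]; rfl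
  · rw [dif_neg hm]; simp; omega

lemma nseLoop_chain (ind : List Int) (n : Nat) :
    ∀ i, i ≤ n → ∀ acc, nseLoop ind n i (chainST ind n i) acc =
      ((List.range i).map (fun k => scanLEQ ind n (ind.getD k 0) (k+1))) ++ acc := by
  intro i
  induction i with
  | zero => intro _ acc; simp [nseLoop]
  | succ i ih =>
    intro h acc
    have hi : i < n := by omega
    show nseLoop ind n (i+1) (chainST ind n (i+1)) acc = _
    rw [nseLoop]
    have hpop : popWhileGT ind (ind.getD i 0) (chainST ind n (i+1))
        = chainST ind n (scanLEQ ind n (ind.getD i 0) (i+1)) :=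
      popWhileGT_chain ind n (ind.getD i 0) (n - (i+1)) (i+1) le_rfl (by omega)
    have hhd : (popWhileGT ind (ind.getD i 0) (chainST ind n (i+1))).headD n
        = scanLEQ ind n (ind.getD i 0) (i+1) := by
      rw [hpop]; exact chainST_headD ind n _ (scanLEQ_le _ _ _ _)
    have hcons : i :: popWhileGT ind (ind.getD i 0) (chainST ind n (i+1)) = chainST ind n i := by
      rw [hpop]
      conv_rhs => rw [chainST]
      rw [dif_pos hi]
    rw [hhd, hcons, ih (by omega)]
    rw [List.range_succ, List.map_append]
    simp

lemma nse_getD (ind : List Int) (n : Nat) (k : Nat) (hk : k < n) :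
    (nseLoop ind n n [] []).getD k n = scanLEQ ind n (ind.getD k 0) (k+1) := by
  have h0 : (chainST ind n n) = [] := by rw [chainST, dif_neg (by omega)]
  have := nseLoop_chain ind n n le_rfl []
  rw [h0] at this
  rw [this]
  simp [List.getD_eq_getElem?_getD, List.getElem?_map, List.getElem?_range hk]

lemma chaseNse_eq (ind : List Int) (n : Nat) (x : Int) :
    ∀ fuel j, j ≤ n → n - j ≤ fuel →
      chaseNse ind (nseLoop ind n n [] []) n x fuel j = scanLEQ ind n x j := by
  intro fuel
  induction fuel with
  | zero =>
    intro j h1 h2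
    have : j = n := by omega
    subst this
    rw [chaseNse, scanLEQ_stop (by omega)]
  | succ fuel ih =>
    intro j h1 h2
    rw [chaseNse]
    by_cases hc : j < n ∧ x < ind.getD j 0
    · rw [if_pos hc]
      obtain ⟨hj, hx⟩ := hc
      rw [nse_getD ind n j hj]
      have hge := scanLEQ_ge ind n (ind.getD j 0) (j+1) (by omega)
      have hle := scanLEQ_le ind n (ind.getD j 0) (j+1)
      rw [ih _ hle (by omega), ← scanLEQ_jump ind n x j hj hx]
    · rw [if_neg hc]
      by_cases hj : j < n
      · have hx : ¬ x < ind.getD j 0 := fun hx => hc ⟨hj, hx⟩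
        exact (scanLEQ_pos hj (by omega)).symm
      · have : j = n := by omega
        subst this
        rw [scanLEQ_stop (by omega)]

lemma scanSkip_absorb (isC : Nat → Bool) (ind : List Int) (n : Nat) (x : Int) (j : Nat) :
    scanSkip isC ind n x (scanLEQ ind n x j) = scanSkip isC ind n x j := by
  conv_lhs => rw [scanSkip]
  conv_rhs => rw [scanSkip]
  rw [scanLEQ_idem]

lemma scanSkip_step (isC : Nat → Bool) (ind : List Int) (n : Nat) (x : Int) (j : Nat)
    (hj : j < n) (hx : x < ind.getD j 0) :
    scanSkip isC ind n x j = scanSkip isC ind n x (j+1) := by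
  rw [← scanSkip_absorb isC ind n x j, ← scanSkip_absorb isC ind n x (j+1), ← scanLEQ_step hj hx]

lemma scanSkip_hit (isC : Nat → Bool) (ind : List Int) (n : Nat) (x : Int) (j : Nat)
    (hj : j < n) (hle : ind.getD j 0 ≤ x) :
    scanSkip isC ind n x j = if isC j then scanSkip isC ind n x (j+1) else j := by
  rw [scanSkip, scanLEQ_pos hj hle, dif_pos hj]

lemma scanSkip_stop (isC : Nat → Bool) (ind : List Int) (n : Nat) (x : Int) (j : Nat)
    (hj : ¬ j < n) : scanSkip isC ind n x j = n := by
  rw [scanSkip, scanLEQ_stop hj, dif_neg (by omega)]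

lemma skipCont_eq (lines : List String) (ind : List Int) (n : Nat) (adjl : List String) (x : Int) :
    ∀ fuel j, j ≤ n → scanLEQ ind n x j = j → n + 1 - j ≤ fuel →
      skipCont lines ind (nseLoop ind n n [] []) n adjl x fuel j =
        scanSkip (fun k => adjl.any (fun t =>
          PySem.Str.startswith (PySem.Str.slice (lines.getD k "") (some x) none) t)) ind n x j := by
  intro fuel
  induction fuel with
  | zero => intro j h1 h2 h3; omega
  | succ fuel ih =>
    intro j h1 hfix h3
    rw [skipCont]
    by_cases hc : j < n ∧ adjl.any (fun t =>
        PySem.Str.startswith (PySem.Str.slice (lines.getD j "") (some x) none) t) = true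
    · rw [if_pos hc]
      obtain ⟨hj, hC⟩ := hc
      have hge := scanLEQ_ge ind n x (j+1) (by omega)
      have hle := scanLEQ_le ind n x (j+1)
      have hxj : ind.getD j 0 ≤ x := by
        by_contra hxx
        rw [scanLEQ_step hj (by omega)] at hfix
        omega
      have hch : chaseNse ind (nseLoop ind n n [] []) n x n (j+1) = scanLEQ ind n x (j+1) :=
        chaseNse_eq ind n x n (j+1) (by omega) (by omega)
      rw [hch]
      rw [ih _ hle (scanLEQ_idem _ _ _ _) (by omega)]
      rw [scanSkip_absorb]
      rw [scanSkip_hit _ ind n x j hj hxj, if_pos hC]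
    · rw [if_neg hc]
      by_cases hj : j < n
      · have hge := scanLEQ_ge ind n x (j+1) (by omega)
        have hxj : ind.getD j 0 ≤ x := by
          by_contra hxx
          rw [scanLEQ_step hj (by omega)] at hfix
          omega
        have hCn : ¬ (adjl.any (fun t =>
            PySem.Str.startswith (PySem.Str.slice (lines.getD j "") (some x) none) t)) = true :=
          fun hC => hc ⟨hj, hC⟩
        rw [scanSkip_hit _ ind n x j hj hxj, if_neg hCn]
      · rw [scanSkip_stop _ _ _ _ _ hj]
        omega

-- ---- string-level lemmas ----

lemma dropWhile_head_false {p : Char → Bool} :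
    ∀ (l : List Char) (c : Char) (t : List Char), List.dropWhile p l = c :: t → p c = false := by
  intro l
  induction l with
  | nil => intro c t h; simp [List.dropWhile] at h
  | cons a l ih =>
    intro c t h
    by_cases hp : p a
    · rw [List.dropWhile_cons_of_pos hp] at h; exact ih _ _ h
    · rw [List.dropWhile_cons_of_neg hp] at h
      cases h
      simpa using hp

lemma find_single (cs : List Char) (c : Char) (t : List Char)
    (hdw : List.dropWhile PySem.Chars.isspace cs = c :: t) :
    PySem.Chars.find cs [c] = ((cs.takeWhile PySem.Chars.isspace).length : Int) := by
  have hsplit : cs.takeWhile PySem.Chars.isspace ++ (c :: t) = cs := by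
    rw [← hdw]; exact List.takeWhile_append_dropWhile
  have hdropk : cs.drop (cs.takeWhile PySem.Chars.isspace).length = c :: t := by
    have h0 := List.drop_left (l₁ := cs.takeWhile PySem.Chars.isspace) (l₂ := c :: t)
    rw [hsplit] at h0
    exact h0
  have hpre : [c] <+: cs.drop (cs.takeWhile PySem.Chars.isspace).length := by
    rw [hdropk]; exact ⟨t, rfl⟩
  have hcfalse : PySem.Chars.isspace c = false := dropWhile_head_false _ _ _ hdw
  have hinf : [c] <:+: cs := ⟨cs.takeWhile PySem.Chars.isspace, t, by simpa using hsplit⟩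
  have hnn : 0 ≤ PySem.Chars.find cs [c] := (PySem.Chars.find_nonneg_iff cs [c]).mpr hinf
  obtain ⟨hp, hmin⟩ := PySem.Chars.find_spec hnn
  have hfk : (PySem.Chars.find cs [c]).toNat = (cs.takeWhile PySem.Chars.isspace).length := by
    set f := (PySem.Chars.find cs [c]).toNat with hf
    set k := (cs.takeWhile PySem.Chars.isspace).length with hk
    rcases Nat.lt_trichotomy f k with h | h | h
    · exfalso
      obtain ⟨u, hu⟩ := hp
      have h1 : cs[f]? = some c := by
        have h2 : (cs.drop f)[0]? = cs[f + 0]? := List.getElem?_drop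
        rw [← hu] at h2
        simpa using h2.symm
      have h2 : cs[f]? = (cs.takeWhile PySem.Chars.isspace)[f]? := by
        conv_lhs => rw [← hsplit]
        exact List.getElem?_append_left h
      have h3 : (cs.takeWhile PySem.Chars.isspace)[f]? = some ((cs.takeWhile PySem.Chars.isspace)[f]'h) :=
        List.getElem?_eq_getElem h
      have h4 : (cs.takeWhile PySem.Chars.isspace)[f]'h = c := by
        rw [h2, h3] at h1
        exact Option.some_inj.mp h1
      have h5 : PySem.Chars.isspace c = true := by
        rw [← h4]
        exact List.mem_takeWhile_imp (List.getElem_mem h)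
      rw [h5] at hcfalse
      exact Bool.noConfusion hcfalse
    · exact h
    · exact absurd hpre (hmin k h)
  have : PySem.Chars.find cs [c] = ((PySem.Chars.find cs [c]).toNat : Int) := (Int.toNat_of_nonneg hnn).symm
  rw [this, hfk]

lemma getInd_eq (line : String) :
    getIndentation line = String.ofList (List.replicate (indNat line) ' ') := by
  have h0 : PySem.Str.pyGet? (PySem.Str.lstrip line) 0 = (PySem.Chars.lstrip line.toList)[0]? := by
    rw [show (0:Int) = ((0:Nat):Int) from rfl, PySem.Str.pyGet?_natCast, PySem.Str.toList_lstrip]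
  rcases hdw : PySem.Chars.lstrip line.toList with _ | ⟨c, t⟩
  · rw [getIndentation, h0, hdw]
    rw [indNat, if_pos hdw]
    rfl
  · have hdw' : List.dropWhile PySem.Chars.isspace line.toList = c :: t := by
      rw [← hdw]; rfl
    have hfind : PySem.Str.find line (String.ofList [c])
        = ((line.toList.takeWhile PySem.Chars.isspace).length : Int) := by
      show PySem.Chars.find line.toList (String.ofList [c]).toList = _
      rw [String.toList_ofList]
      exact find_single line.toList c t hdw'
    rw [getIndentation, h0, hdw]
    simp only [List.getElem?_cons_zero]
    rw [hfind]
    rw [if_neg (by omega)]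
    rw [PySem.List.pyRepeat_singleton, Int.toNat_natCast]
    rw [indNat, if_neg (by rw [hdw]; simp)]

lemma strlen_repl (m : Nat) : PySem.Str.len (String.ofList (List.replicate m ' ')) = (m : Int) := by
  show ((String.ofList (List.replicate m ' ')).toList.length : Int) = (m : Int)
  rw [String.toList_ofList, List.length_replicate]

lemma repl_lt (a b : Nat) : ((List.replicate a ' ' : List Char) < List.replicate b ' ') ↔ a < b := by
  induction a generalizing b with
  | zero =>
    cases b with
    | zero => simp
    | succ b =>
      simp only [List.replicate_zero, List.replicate_succ]
      exact iff_of_true (List.nil_lt_cons _ _) (by omega)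
  | succ a ih =>
    cases b with
    | zero =>
      simp only [List.replicate_succ, List.replicate_zero]
      exact iff_of_false (fun h => by cases h) (by omega)
    | succ b =>
      rw [List.replicate_succ, List.replicate_succ, List.cons_lt_cons_iff]
      constructor
      · rintro (h | ⟨-, h⟩)
        · exact absurd h (lt_irrefl _)
        · exact Nat.succ_lt_succ ((ih b).mp h)
      · intro h
        exact Or.inr ⟨rfl, (ih b).mpr (by omega)⟩

lemma repl_le (a b : Nat) :
    (String.ofList (List.replicate a ' ') ≤ String.ofList (List.replicate b ' ')) ↔ a ≤ b := by
  rw [← not_lt]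
  have hlt : (String.ofList (List.replicate b ' ') < String.ofList (List.replicate a ' '))
      ↔ ((List.replicate b ' ' : List Char) < List.replicate a ' ') := by
    rw [String.lt_iff_toList_lt, String.toList_ofList, String.toList_ofList]
  rw [hlt, repl_lt]
  omega

lemma pyGetD_nat (lines : List String) (j : Nat) :
    (PySem.List.pyGet? lines ((j : Nat) : Int)).getD "" = lines.getD j "" := by
  rw [PySem.List.pyGet?_natCast, List.getD_eq_getElem?_getD]

lemma stripped_getD (lines : List String) (k : Nat) (hk : k < lines.length) :
    (lines.map PySem.Str.lstrip).getD k "" = PySem.Str.lstrip (lines.getD k "") := by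
  rw [List.getD_eq_getElem?_getD, List.getD_eq_getElem?_getD, List.getElem?_map]
  rw [List.getElem?_eq_getElem hk]
  rfl

lemma bLineIndent_indNat (l : String) :
    bLineIndent (l, PySem.Str.lstrip l) = ((indNat l : Nat) : Int) := by
  have hempty : (PySem.Str.lstrip l = "") ↔ PySem.Chars.lstrip l.toList = [] := by
    rw [show PySem.Str.lstrip l = String.ofList (PySem.Chars.lstrip l.toList) from rfl]
    exact String.ofList_eq_empty_iff
  rw [bLineIndent, indNat]
  by_cases h : PySem.Chars.lstrip l.toList = []
  · rw [if_pos (hempty.mpr h), if_pos h]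
    rfl
  · rw [if_neg (fun hc => h (hempty.mp hc)), if_neg h]
    show ((l.toList.length : Int)) - (((PySem.Str.lstrip l).toList.length : Int)) = _
    rw [PySem.Str.toList_lstrip]
    have hsplit : l.toList.takeWhile PySem.Chars.isspace ++ PySem.Chars.lstrip l.toList = l.toList := by
      exact List.takeWhile_append_dropWhile
    have hlen : (l.toList.takeWhile PySem.Chars.isspace).length + (PySem.Chars.lstrip l.toList).length
        = l.toList.length := by
      have h0 := congrArg List.length hsplit
      rw [List.length_append] at h0
      exact h0
    omega

lemma ind_getD (lines : List String) (m : Nat) (hm : m < lines.length) :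
    (indList lines).getD m 0 = ((indNat ((lines.getD m "")) : Nat) : Int) := by
  rw [indList, List.getD_eq_getElem?_getD, List.getElem?_map]
  have hmz : m < (lines.zip (lines.map PySem.Str.lstrip)).length := by
    simp [List.length_zip, hm]
  rw [List.getElem?_eq_getElem hmz]
  simp only [Option.map_some, Option.getD_some]
  rw [List.getElem_zip, List.getElem_map]
  rw [bLineIndent_indNat]
  rw [List.getD_eq_getElem?_getD, List.getElem?_eq_getElem hm]
  rfl

lemma enumerate_eq (lines : List String) :
    ∀ s : Int, PySem.List.enumerate lines s
      = (List.range lines.length).map (fun (k : Nat) => ((s + (k : Int)), lines.getD k "")) := by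
  induction lines with
  | nil => intro s; simp [PySem.List.enumerate]
  | cons a t ih =>
    intro s
    show (s, a) :: PySem.List.enumerate t (s+1) = _
    rw [ih (s+1)]
    rw [List.length_cons, List.range_succ_eq_map, List.map_cons, List.map_map]
    simp only [Nat.cast_zero, add_zero, List.getD_cons_zero]
    congr 1
    apply List.map_congr_left
    intro k _
    simp only [Function.comp_apply, Nat.succ_eq_add_one, List.getD_cons_succ, Prod.mk.injEq]
    refine ⟨by push_cast; ring, trivial⟩

lemma pyRange_eq (n : Nat) : ∀ (d j : Nat), n - j ≤ d →
    PySem.List.pyRange (j : Int) (n : Int) = (List.range' j (n - j)).map (fun m => ((m : Nat) : Int)) := by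
  intro d
  induction d with
  | zero =>
    intro j h
    have hj : ¬ ((j:Int) < (n:Int)) := by omega
    have hnj : n - j = 0 := by omega
    rw [hnj]
    simp [PySem.List.pyRange, hj]
  | succ d ih =>
    intro j h
    by_cases hj : j < n
    · rw [PySem.List.pyRange_one_cons (by omega)]
      have : (j : Int) + 1 = ((j + 1 : Nat) : Int) := by push_cast; ring
      rw [this, ih (j+1) (by omega)]
      have hnj : n - j = (n - (j+1)) + 1 := by omega
      rw [hnj, List.range'_succ]
      simp
    · have hnj : n - j = 0 := by omega
      rw [hnj]
      simp [PySem.List.pyRange, show ¬ ((j:Int) < (n:Int)) by omega]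

-- per-index contribution of A's loop body
def FA (lines : List String) (k : Nat) : List (List Int) :=
  if PySem.Str.startswith (PySem.Str.lstrip ((lines.getD k ""))) "return " then []
  else if getIndentation ((PySem.List.pyGet? lines (min ((k:Int)+1) ((lines.length:Int)-1))).getD "")
          ≤ getIndentation ((lines.getD k "")) then [[(k:Int), (k:Int)]]
  else if (chunkAdjacencies.foldl (fun acc kv => kv.2.foldl (fun acc2 j => acc2 ++ [j]) acc) []).foldl
          (fun sc t => if PySem.Str.startswith (PySem.Str.lstrip ((PySem.List.pyGet? lines (k:Int)).getD "")) t
                       then true else sc) false then []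
  else [[(k:Int), innerLoopA lines (k:Int) (getIndentation ((lines.getD k "")))
          (PySem.List.pyRange ((k:Int)+1) (lines.length:Int)) ((lines.length:Int)-1)]]

-- per-index contribution of B's loop body
def FB (lines : List String) (i : Nat) : List (List Int) :=
  let n := lines.length
  let stripped := lines.map PySem.Str.lstrip
  let ind := indList lines
  let nse := nseLoop ind n n [] []
  let titles := chunkAdjacencies.flatMap (fun kv => kv.2)
  let s := stripped.getD i ""
  if PySem.Str.startswith s "return " then []
  else
    let xi := ind.getD i 0
    if ind.getD (min (i+1) (n-1)) 0 ≤ xi then [[(i:Int), (i:Int)]]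
    else if titles.any (fun t => PySem.Str.startswith s t) then []
    else
      let adj := chunkAdjacencies.foldl (fun a kv => if PySem.Str.startswith s kv.1 then some kv.2 else a) none
      let j0 := nse.getD i n
      let j := match adj with
        | none => j0
        | some adjl => skipCont lines ind nse n adjl xi n j0
      [[(i:Int), if n ≤ j then (n:Int) - 1 else (j:Int) - 1]]

lemma LA (lines : List String) :
    getChunksToTime lines = (List.range lines.length).flatMap (FA lines) := by
  rw [getChunksToTime]
  rw [enumerate_eq lines 0]
  rw [List.foldl_map]
  have hbody : ∀ (acc : List (List Int)) (k : Nat), k ∈ List.range lines.length →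
      (fun indices il =>
        let index := il.1
        let line := il.2
        if PySem.Str.startswith (PySem.Str.lstrip line) "return " then indices
        else
          let lineindentation := getIndentation line
          let nextlineindentation :=
            getIndentation ((PySem.List.pyGet? lines (min (index+1) ((lines.length:Int)-1))).getD "")
          if nextlineindentation ≤ lineindentation then indices ++ [[index, index]]
          else
            let adjacentchunktitles := chunkAdjacencies.foldl
              (fun acc kv => kv.2.foldl (fun acc2 j => acc2 ++ [j]) acc) []
            if adjacentchunktitles.foldl (fun sc t =>
                if PySem.Str.startswith (PySem.Str.lstrip ((PySem.List.pyGet? lines index).getD "")) t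
                then true else sc) false
            then indices
            else indices ++ [[index,
              innerLoopA lines index lineindentation
                (PySem.List.pyRange (index+1) (lines.length:Int)) ((lines.length:Int)-1)]])
        acc (((0:Int) + (k:Int)), lines.getD k "")
      = acc ++ FA lines k := by
    intro acc k _
    simp only [FA, zero_add]
    split_ifs <;> simp
  rw [PySem.List.foldl_congr_mem _ _ _ _ hbody]
  rw [PySem.List.foldl_append_eq_flatMap]
  rfl

lemma LB (lines : List String) :
    getChunksToTime_alt lines = (List.range lines.length).flatMap (FB lines) := by
  rw [getChunksToTime_alt]
  have hbody : ∀ (acc : List (List Int)) (i : Nat), i ∈ List.range lines.length →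
      (fun out i =>
        let s := (lines.map PySem.Str.lstrip).getD i ""
        if PySem.Str.startswith s "return " then out
        else
          let xi := ((lines.zip (lines.map PySem.Str.lstrip)).map bLineIndent).getD i 0
          if ((lines.zip (lines.map PySem.Str.lstrip)).map bLineIndent).getD
              (min (i+1) (lines.length-1)) 0 ≤ xi then out ++ [[(i:Int), (i:Int)]]
          else if (chunkAdjacencies.flatMap (fun kv => kv.2)).any
              (fun t => PySem.Str.startswith s t) then out
          else
            let adj := chunkAdjacencies.foldl
              (fun a kv => if PySem.Str.startswith s kv.1 then some kv.2 else a) none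
            let j0 := (nseLoop ((lines.zip (lines.map PySem.Str.lstrip)).map bLineIndent)
                lines.length lines.length [] []).getD i lines.length
            let j := match adj with
              | none => j0
              | some adjl => skipCont lines ((lines.zip (lines.map PySem.Str.lstrip)).map bLineIndent)
                  (nseLoop ((lines.zip (lines.map PySem.Str.lstrip)).map bLineIndent)
                    lines.length lines.length [] []) lines.length adjl xi lines.length j0
            out ++ [[(i:Int), if lines.length ≤ j then (lines.length:Int) - 1 else (j:Int) - 1]])
        acc i
      = acc ++ FB lines i := by
    intro acc i _
    simp only [FB, indList]
    split_ifs <;> simp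
  rw [PySem.List.foldl_congr_mem _ _ _ _ hbody]
  rw [PySem.List.foldl_append_eq_flatMap]
  rfl

lemma titles_concrete :
    (chunkAdjacencies.foldl (fun acc kv => kv.2.foldl (fun acc2 j => acc2 ++ [j]) acc) [])
      = ["elif ", "else:", "except ", "except:", "finally:"] := rfl

lemma titles_concrete' :
    (chunkAdjacencies.flatMap (fun kv => kv.2)) = ["elif ", "else:", "except ", "except:", "finally:"] := rfl

-- A's inner scan equals the reference scan: no-adjacency case
lemma innerA_none (lines : List String) (k : Nat) (_hk : k < lines.length)
    (hpa : chunkAdjacencies.foldl (fun a kv =>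
        if PySem.Str.startswith (PySem.Str.lstrip (lines.getD k "")) kv.1 then some kv.2 else a) none
      = none) :
    ∀ (d j : Nat), lines.length - j ≤ d → j ≤ lines.length →
    innerLoopA lines (k:Int) (getIndentation (lines.getD k ""))
        ((List.range' j (lines.length - j)).map (fun m => ((m : Nat) : Int))) ((lines.length:Int)-1)
      = (if scanLEQ (indList lines) lines.length ((indNat (lines.getD k "") : Nat) : Int) j
            = lines.length
         then (lines.length:Int)-1
         else ((scanLEQ (indList lines) lines.length ((indNat (lines.getD k "") : Nat) : Int) j : Nat) : Int) - 1) := by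
  intro d
  induction d with
  | zero =>
    intro j h1 h2
    rw [show lines.length - j = 0 from by omega, show List.range' j 0 = [] from rfl, List.map_nil]
    rw [scanLEQ_stop (by omega), if_pos rfl]
    rfl
  | succ d ih =>
    intro j h1 h2
    by_cases hj : j < lines.length
    · rw [show lines.length - j = (lines.length - (j+1)) + 1 from by omega,
          List.range'_succ, List.map_cons]
      rw [innerLoopA]
      rw [pyGetD_nat lines j, pyGetD_nat lines k]
      have hcond : (getIndentation (lines.getD j "") ≤ getIndentation (lines.getD k ""))
          ↔ (indNat (lines.getD j "") ≤ indNat (lines.getD k "")) := by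
        rw [getInd_eq, getInd_eq]
        exact repl_le _ _
      by_cases hcmp : indNat (lines.getD j "") ≤ indNat (lines.getD k "")
      · rw [if_pos (hcond.mpr hcmp)]
        rw [hpa]
        have hleq : scanLEQ (indList lines) lines.length ((indNat (lines.getD k "") : Nat) : Int) j = j := by
          apply scanLEQ_pos hj
          rw [ind_getD lines j hj]
          exact_mod_cast hcmp
        rw [hleq, if_neg (by omega)]
      · rw [if_neg (fun hc => hcmp (hcond.mp hc))]
        have hgt : ((indNat (lines.getD k "") : Nat) : Int) < (indList lines).getD j 0 := by
          rw [ind_getD lines j hj]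
          exact_mod_cast Nat.lt_of_not_le hcmp
        rw [scanLEQ_step hj hgt]
        exact ih (j+1) (by omega) (by omega)
    · rw [show lines.length - j = 0 from by omega, show List.range' j 0 = [] from rfl, List.map_nil]
      rw [scanLEQ_stop (by omega), if_pos rfl]
      rfl

-- A's inner scan equals the reference skip-scan: adjacency case
lemma innerA_some (lines : List String) (k : Nat) (_hk : k < lines.length) (adjl : List String)
    (hpa : chunkAdjacencies.foldl (fun a kv =>
        if PySem.Str.startswith (PySem.Str.lstrip (lines.getD k "")) kv.1 then some kv.2 else a) none
      = some adjl) :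
    ∀ (d j : Nat), lines.length - j ≤ d → j ≤ lines.length →
    innerLoopA lines (k:Int) (getIndentation (lines.getD k ""))
        ((List.range' j (lines.length - j)).map (fun m => ((m : Nat) : Int))) ((lines.length:Int)-1)
      = (if scanSkip (fun m => adjl.any (fun t => PySem.Str.startswith
              (PySem.Str.slice (lines.getD m "") (some ((indNat (lines.getD k "") : Nat) : Int)) none) t))
            (indList lines) lines.length ((indNat (lines.getD k "") : Nat) : Int) j
            = lines.length
         then (lines.length:Int)-1
         else ((scanSkip (fun m => adjl.any (fun t => PySem.Str.startswith
              (PySem.Str.slice (lines.getD m "") (some ((indNat (lines.getD k "") : Nat) : Int)) none) t))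
            (indList lines) lines.length ((indNat (lines.getD k "") : Nat) : Int) j : Nat) : Int) - 1) := by
  intro d
  induction d with
  | zero =>
    intro j h1 h2
    rw [show lines.length - j = 0 from by omega, show List.range' j 0 = [] from rfl, List.map_nil]
    rw [scanSkip_stop _ _ _ _ _ (by omega), if_pos rfl]
    rfl
  | succ d ih =>
    intro j h1 h2
    by_cases hj : j < lines.length
    · rw [show lines.length - j = (lines.length - (j+1)) + 1 from by omega,
          List.range'_succ, List.map_cons]
      rw [innerLoopA]
      rw [pyGetD_nat lines j, pyGetD_nat lines k]
      have hcond : (getIndentation (lines.getD j "") ≤ getIndentation (lines.getD k ""))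
          ↔ (indNat (lines.getD j "") ≤ indNat (lines.getD k "")) := by
        rw [getInd_eq, getInd_eq]
        exact repl_le _ _
      have hlen2 : PySem.Str.len (getIndentation (lines.getD k ""))
          = ((indNat (lines.getD k "") : Nat) : Int) := by
        rw [getInd_eq]
        exact strlen_repl _
      by_cases hcmp : indNat (lines.getD j "") ≤ indNat (lines.getD k "")
      · rw [if_pos (hcond.mpr hcmp)]
        rw [hpa]
        dsimp only
        have hlej : (indList lines).getD j 0 ≤ ((indNat (lines.getD k "") : Nat) : Int) := by
          rw [ind_getD lines j hj]
          exact_mod_cast hcmp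
        rw [hlen2]
        rw [PySem.List.foldl_if_true_eq (fun potadj => PySem.Str.startswith
            (PySem.Str.slice (lines.getD j "") (some ((indNat (lines.getD k "") : Nat) : Int)) none) potadj)
            adjl false, Bool.false_or]
        by_cases hC : adjl.any (fun t => PySem.Str.startswith
            (PySem.Str.slice (lines.getD j "") (some ((indNat (lines.getD k "") : Nat) : Int)) none) t) = true
        · rw [if_pos hC]
          rw [scanSkip_hit _ _ _ _ _ hj hlej, if_pos hC]
          exact ih (j+1) (by omega) (by omega)
        · rw [if_neg hC]
          rw [scanSkip_hit _ _ _ _ _ hj hlej, if_neg hC]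
          rw [if_neg (by omega)]
      · rw [if_neg (fun hc => hcmp (hcond.mp hc))]
        have hgt : ((indNat (lines.getD k "") : Nat) : Int) < (indList lines).getD j 0 := by
          rw [ind_getD lines j hj]
          exact_mod_cast Nat.lt_of_not_le hcmp
        rw [scanSkip_step _ _ _ _ _ hj hgt]
        exact ih (j+1) (by omega) (by omega)
    · rw [show lines.length - j = 0 from by omega, show List.range' j 0 = [] from rfl, List.map_nil]
      rw [scanSkip_stop _ _ _ _ _ (by omega), if_pos rfl]
      rfl

lemma LF (lines : List String) (k : Nat) (hk : k < lines.length) :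
    FA lines k = FB lines k := by
  unfold FA FB
  dsimp only
  rw [stripped_getD lines k hk]
  by_cases hret : PySem.Str.startswith (PySem.Str.lstrip (lines.getD k "")) "return " = true
  · rw [if_pos hret, if_pos hret]
  · rw [if_neg hret, if_neg hret]
    have hminlt : min (k+1) (lines.length-1) < lines.length := by omega
    have hmin : (min ((k:Int)+1) ((lines.length:Int)-1)) = ((min (k+1) (lines.length-1) : Nat) : Int) := by
      omega
    have hA2 : (getIndentation ((PySem.List.pyGet? lines (min ((k:Int)+1) ((lines.length:Int)-1))).getD "")
          ≤ getIndentation (lines.getD k ""))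
        ↔ ((indList lines).getD (min (k+1) (lines.length-1)) 0 ≤ (indList lines).getD k 0) := by
      rw [hmin, pyGetD_nat, getInd_eq, getInd_eq, repl_le]
      rw [ind_getD lines _ hminlt, ind_getD lines k hk]
      exact Nat.cast_le.symm
    by_cases hle2 : (indList lines).getD (min (k+1) (lines.length-1)) 0 ≤ (indList lines).getD k 0
    · rw [if_pos (hA2.mpr hle2), if_pos hle2]
    · rw [if_neg (fun hc => hle2 (hA2.mp hc)), if_neg hle2]
      rw [titles_concrete, titles_concrete']
      rw [pyGetD_nat lines k]
      rw [PySem.List.foldl_if_true_eq, Bool.false_or]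
      by_cases hsh : (["elif ", "else:", "except ", "except:", "finally:"]).any
          (fun t => PySem.Str.startswith (PySem.Str.lstrip (lines.getD k "")) t) = true
      · rw [if_pos hsh, if_pos hsh]
      · rw [if_neg hsh, if_neg hsh]
        rw [show ((k:Int)+1) = ((k+1 : Nat) : Int) from by push_cast; ring]
        rw [pyRange_eq lines.length (lines.length - (k+1)) (k+1) le_rfl]
        have hxk : (indList lines).getD k 0 = ((indNat (lines.getD k "") : Nat) : Int) :=
          ind_getD lines k hk
        rcases hpa : chunkAdjacencies.foldl (fun a kv =>
            if PySem.Str.startswith (PySem.Str.lstrip (lines.getD k "")) kv.1 then some kv.2 else a) none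
          with _ | adjl
        · rw [innerA_none lines k hk hpa (lines.length - (k+1)) (k+1) le_rfl (by omega)]
          rw [hpa]
          dsimp only
          rw [nse_getD (indList lines) lines.length k hk, hxk]
          have hle := scanLEQ_le (indList lines) lines.length
            ((indNat (lines.getD k "") : Nat) : Int) (k+1)
          by_cases hn : scanLEQ (indList lines) lines.length
              ((indNat (lines.getD k "") : Nat) : Int) (k+1) = lines.length
          · rw [if_pos hn, hn, if_pos le_rfl]
          · rw [if_neg hn, if_neg (by omega)]
        · rw [innerA_some lines k hk adjl hpa (lines.length - (k+1)) (k+1) le_rfl (by omega)]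
          simp only [hpa]
          rw [nse_getD (indList lines) lines.length k hk, hxk]
          have hge := scanLEQ_ge (indList lines) lines.length
            ((indNat (lines.getD k "") : Nat) : Int) (k+1) (by omega)
          have hle := scanLEQ_le (indList lines) lines.length
            ((indNat (lines.getD k "") : Nat) : Int) (k+1)
          rw [skipCont_eq lines (indList lines) lines.length adjl _ lines.length _
            hle (scanLEQ_idem _ _ _ _) (by omega)]
          rw [scanSkip_absorb]
          have hles := scanSkip_le (fun m => adjl.any (fun t => PySem.Str.startswith
              (PySem.Str.slice (lines.getD m "") (some ((indNat (lines.getD k "") : Nat) : Int)) none) t))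
            (indList lines) lines.length ((indNat (lines.getD k "") : Nat) : Int) (k+1)
          by_cases hn : scanSkip (fun m => adjl.any (fun t => PySem.Str.startswith
              (PySem.Str.slice (lines.getD m "") (some ((indNat (lines.getD k "") : Nat) : Int)) none) t))
              (indList lines) lines.length ((indNat (lines.getD k "") : Nat) : Int) (k+1) = lines.length
          · rw [if_pos hn, hn, if_pos le_rfl]
          · rw [if_neg hn, if_neg (by omega)]

-- ===== VERDICT (by name: the statement is the Claim_ definition above) =====
theorem getChunksToTime_spec : Claim_equal_getChunksToTime := by
  intro lines _
  show getChunksToTime lines = getChunksToTime_alt lines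
  rw [LA, LB]
  rw [List.flatMap_def, List.flatMap_def]
  congr 1
  apply List.map_congr_left
  intro k hkmem
  exact LF lines k (List.mem_range.mp hkmem)
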